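-- pv_equiv track=rewrite | github.com/SeungjaeLim/challenge100-codingtest-study | SeungjaeLim/PGS/codingtest_kit/brute_force/모의고사.py | solution
-- ===== SOURCE A (Python) =====
-- def solution(answers):
--     answer = []
--
--     ans1 = [1, 2, 3, 4, 5] * 2000
--     ans2 = [2, 1, 2, 3, 2, 4, 2, 5] * 1250
--     ans3 = [3, 3, 1, 1, 2, 2, 4, 4, 5, 5] * 1000
--
--     for i, v in enumerate(answers):
--         ans1[i] -= v
--         ans2[i] -= v
--         ans3[i] -= v
--
--     col = []
--     col.append(ans1.count(0))
--     col.append(ans2.count(0))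
--     col.append(ans3.count(0))
--
--     maxcol = -1
--     for i, v in enumerate(col):
--         if v > maxcol:
--             maxcol = v
--             answer = []
--             answer.append(i+1)
--         elif v == maxcol:
--             answer.append(i+1)
--
--     return answer
-- ===== SOURCE B (Python) =====
-- def solution(answers):
--     p1 = [1, 2, 3, 4, 5]
--     p2 = [2, 1, 2, 3, 2, 4, 2, 5]
--     p3 = [3, 3, 1, 1, 2, 2, 4, 4, 5, 5]
--     c1 = 0
--     c2 = 0
--     c3 = 0
--     i = 0
--     for v in answers:
--         if p1[i % 5] == v:
--             c1 += 1
--         if p2[i % 8] == v: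
--             c2 += 1
--         if p3[i % 10] == v:
--             c3 += 1
--         i += 1
--     m = max(c1, max(c2, c3))
--     return [k + 1 for k, c in enumerate([c1, c2, c3]) if c == m]
-- ===== Notes on version B (the rewrite author's own statement) =====
-- stated objective: faster
-- what changed: Instead of materialising three 10000-element repeated pattern lists, mutating them in place and counting zeros, B makes one pass over the answers comparing each to the three 5/8/10-element base patterns via index mod, then picks the maximal counters; Pre_ excludes lists longer than 10000, on which A raises IndexError.
import Mathlib
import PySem

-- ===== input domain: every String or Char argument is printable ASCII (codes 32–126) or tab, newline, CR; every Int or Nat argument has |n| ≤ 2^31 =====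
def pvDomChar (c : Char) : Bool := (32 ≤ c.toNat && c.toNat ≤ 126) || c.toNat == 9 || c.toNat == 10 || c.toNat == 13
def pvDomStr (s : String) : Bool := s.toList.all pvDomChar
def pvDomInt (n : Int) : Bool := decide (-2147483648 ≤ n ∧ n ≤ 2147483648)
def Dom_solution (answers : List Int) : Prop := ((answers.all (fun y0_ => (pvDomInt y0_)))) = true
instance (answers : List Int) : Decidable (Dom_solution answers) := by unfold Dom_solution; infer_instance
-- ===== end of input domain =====

-- B replaces A's three mutated 10000-element pattern lists by a single pass over the
-- answers with index-mod lookups into the 5/8/10-element base patterns (faster by a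
-- constant: no 10000-element allocation and scan).

-- ===== PORT A =====
def solution (answers : List Int) : List Int :=
  let ans1 := (List.replicate 2000 ([1, 2, 3, 4, 5] : List Int)).flatten
  let ans2 := (List.replicate 1250 ([2, 1, 2, 3, 2, 4, 2, 5] : List Int)).flatten
  let ans3 := (List.replicate 1000 ([3, 3, 1, 1, 2, 2, 4, 4, 5, 5] : List Int)).flatten
  let st := (PySem.List.enumerate answers 0).foldl
    (fun (s : List Int × List Int × List Int) iv =>
      (PySem.List.pySetD s.1 iv.1 (PySem.List.pyGetD s.1 iv.1 0 - iv.2),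
       PySem.List.pySetD s.2.1 iv.1 (PySem.List.pyGetD s.2.1 iv.1 0 - iv.2),
       PySem.List.pySetD s.2.2 iv.1 (PySem.List.pyGetD s.2.2 iv.1 0 - iv.2)))
    (ans1, ans2, ans3)
  let col : List Int :=
    [PySem.List.count st.1 (0 : Int), PySem.List.count st.2.1 (0 : Int),
     PySem.List.count st.2.2 (0 : Int)]
  let fin := (PySem.List.enumerate col 0).foldl
    (fun (s : Int × List Int) iv =>
      if iv.2 > s.1 then (iv.2, [iv.1 + 1])
      else if iv.2 = s.1 then (s.1, s.2 ++ [iv.1 + 1])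
      else s)
    (-1, [])
  fin.2

-- ===== PORT B =====
def pat1 : List Int := [1, 2, 3, 4, 5]
def pat2 : List Int := [2, 1, 2, 3, 2, 4, 2, 5]
def pat3 : List Int := [3, 3, 1, 1, 2, 2, 4, 4, 5, 5]

-- Source B's single loop: three counters, index i, compare to the base patterns via i mod len
def goB (c1 c2 c3 : Int) (i : Nat) : List Int → Int × Int × Int
  | [] => (c1, c2, c3)
  | v :: rest =>
      goB (if pat1.getD (i % 5) 0 = v then c1 + 1 else c1)
          (if pat2.getD (i % 8) 0 = v then c2 + 1 else c2)
          (if pat3.getD (i % 10) 0 = v then c3 + 1 else c3)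
          (i + 1) rest

def solution_alt (answers : List Int) : List Int :=
  let c := goB 0 0 0 0 answers
  let m := max c.1 (max c.2.1 c.2.2)
  (PySem.List.enumerate [c.1, c.2.1, c.2.2] 0).filterMap
    (fun kv => if kv.2 = m then some (kv.1 + 1) else none)

-- ===== PRECONDITION & SPEC =====
-- Pre_ excludes lists longer than 10000, on which A raises IndexError (its pattern lists are exhausted).
def Pre_solution (answers : List Int) : Prop := answers.length ≤ 10000
instance (answers : List Int) : Decidable (Pre_solution answers) := by unfold Pre_solution; infer_instance
def pvWitness_solution : List Int := [1, 3, 2, 4, 2]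

def Spec_solution (answers : List Int) (out : List Int) : Prop := out = solution_alt answers
instance (answers : List Int) (out : List Int) : Decidable (Spec_solution answers out) := by unfold Spec_solution; infer_instance

-- ===== CLAIM (what is proved, stated in full; the proofs are below) =====
def Claim_equal_solution : Prop := ∀ (answers : List Int), Dom_solution answers → Pre_solution answers → Spec_solution answers (solution answers)

-- ===== LEMMAS AND PROOFS =====

-- count of matches against pattern `pat` cycled from index i (the common spec of both counters)
def cnt (pat : List Int) (i : Nat) : List Int → Int
  | [] => 0
  | v :: r => (if pat.getD (i % pat.length) 0 = v then 1 else 0) + cnt pat (i + 1) r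

theorem cnt_nonneg (pat : List Int) (i : Nat) (xs : List Int) : 0 ≤ cnt pat i xs := by
  induction xs generalizing i with
  | nil => simp [cnt]
  | cons v r ih => simp only [cnt]; have := ih (i + 1); split <;> omega

theorem goB_eq (xs : List Int) (c1 c2 c3 : Int) (i : Nat) :
    goB c1 c2 c3 i xs = (c1 + cnt pat1 i xs, c2 + cnt pat2 i xs, c3 + cnt pat3 i xs) := by
  induction xs generalizing c1 c2 c3 i with
  | nil => simp [goB, cnt]
  | cons v r ih =>
      simp only [goB, cnt, ih]
      have h1 : pat1.length = 5 := rfl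
      have h2 : pat2.length = 8 := rfl
      have h3 : pat3.length = 10 := rfl
      rw [h1, h2, h3]
      split_ifs <;> simp only [Prod.mk.injEq] <;> and_intros <;> ring

-- a fold over a triple whose components are updated independently splits
theorem foldl_prod3 (l : List (Int × Int)) (a b c : List Int) :
    l.foldl (fun (s : List Int × List Int × List Int) iv =>
      (PySem.List.pySetD s.1 iv.1 (PySem.List.pyGetD s.1 iv.1 0 - iv.2),
       PySem.List.pySetD s.2.1 iv.1 (PySem.List.pyGetD s.2.1 iv.1 0 - iv.2),
       PySem.List.pySetD s.2.2 iv.1 (PySem.List.pyGetD s.2.2 iv.1 0 - iv.2))) (a, b, c)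
    = (l.foldl (fun (x : List Int) iv =>
          PySem.List.pySetD x iv.1 (PySem.List.pyGetD x iv.1 0 - iv.2)) a,
       l.foldl (fun (x : List Int) iv =>
          PySem.List.pySetD x iv.1 (PySem.List.pyGetD x iv.1 0 - iv.2)) b,
       l.foldl (fun (x : List Int) iv =>
          PySem.List.pySetD x iv.1 (PySem.List.pyGetD x iv.1 0 - iv.2)) c) := by
  induction l generalizing a b c with
  | nil => rfl
  | cons x t ih => simp only [List.foldl_cons]; rw [ih]

-- shape of A's update loop: it subtracts pointwise on a prefix and leaves the tail alone
theorem foldA_shape (xs : List Int) : ∀ (pre P : List Int), xs.length ≤ P.length →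
    (PySem.List.enumerate xs (pre.length : Int)).foldl
      (fun (a : List Int) (iv : Int × Int) =>
        PySem.List.pySetD a iv.1 (PySem.List.pyGetD a iv.1 0 - iv.2)) (pre ++ P)
    = pre ++ (List.zipWith (fun p v => p - v) P xs ++ P.drop xs.length) := by
  induction xs with
  | nil => simp
  | cons v r ih =>
      intro pre P hlen
      cases P with
      | nil => simp at hlen
      | cons p P' =>
          rw [PySem.List.enumerate_cons]
          simp only [List.foldl_cons]
          have hget : PySem.List.pyGetD (pre ++ p :: P') (pre.length : Int) 0 = p := by
            rw [PySem.List.pyGetD_natCast]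
            simp [List.getD]
          have hset : PySem.List.pySetD (pre ++ p :: P') (pre.length : Int) (p - v)
              = (pre ++ [p - v]) ++ P' := by
            rw [PySem.List.pySetD_natCast]
            rw [List.set_append_right _ _ (le_refl _)]
            simp
          rw [hget, hset]
          have hlen' : ((pre ++ [p - v]).length : Int) = (pre.length : Int) + 1 := by
            simp
          rw [← hlen']
          rw [ih (pre ++ [p - v]) P' (by simpa using hlen)]
          simp

-- the cycled pattern list reads as the base pattern at index mod
theorem cyc_getD (pat : List Int) (hp : pat ≠ []) : ∀ (m j : Nat), j < pat.length * m →
    (List.flatten (List.replicate m pat)).getD j 0 = pat.getD (j % pat.length) 0 := by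
  intro m
  induction m with
  | zero => intro j h; omega
  | succ k ih =>
      intro j h
      rw [List.replicate_succ, List.flatten_cons]
      by_cases hj : j < pat.length
      · rw [List.getD, List.getElem?_append_left hj, Nat.mod_eq_of_lt hj]; rfl
      · rw [not_lt] at hj
        rw [List.getD, List.getElem?_append_right hj]
        have h2 : j - pat.length < pat.length * k := by
          have hl : 0 < pat.length := List.length_pos_iff.mpr hp
          have : pat.length * (k + 1) = pat.length * k + pat.length := by ring
          omega
        have := ih (j - pat.length) h2
        rw [List.getD] at this
        rw [this]
        have hj' : j = (j - pat.length) + pat.length := by omega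
        rw [hj', Nat.add_mod_right]
        simp

theorem len_flat_rep (pat : List Int) (m : Nat) :
    (List.flatten (List.replicate m pat)).length = pat.length * m := by
  induction m with
  | zero => simp
  | succ k ih => rw [List.replicate_succ, List.flatten_cons]; simp [ih]; ring

-- counting zeros in the pointwise difference is counting matches against the cycle
theorem count_zip (pat : List Int) (xs : List Int) : ∀ (P : List Int) (i : Nat),
    xs.length ≤ P.length →
    (∀ j, j < xs.length → P.getD j 0 = pat.getD ((i + j) % pat.length) 0) →
    PySem.List.count (List.zipWith (fun p v => p - v) P xs) (0 : Int) = cnt pat i xs := by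
  induction xs with
  | nil => intro P i _ _; simp [cnt, PySem.List.count]
  | cons v r ih =>
      intro P i hlen hagree
      cases P with
      | nil => simp at hlen
      | cons p P' =>
          have hp : p = pat.getD (i % pat.length) 0 := by
            have := hagree 0 (by simp)
            simpa using this
          have hrec := ih P' (i + 1) (by simpa using hlen)
            (fun j hj => by
              have := hagree (j + 1) (by simpa using Nat.succ_lt_succ hj)
              simpa [show i + (j + 1) = i + 1 + j by omega] using this)
          simp only [List.zipWith_cons_cons, PySem.List.count_eq, List.count_cons] at *
          push_cast
          rw [hrec]
          simp only [cnt, hp]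
          by_cases he : pat.getD (i % pat.length) 0 = v
          · simp [sub_eq_zero]
            ring
          · have hne : ¬ (pat.getD (i % pat.length) 0 - v = 0) := fun h => he (by linarith [sub_eq_zero.mp h])
            simp only [beq_iff_eq]
            rw [if_neg hne, if_neg he]
            ring

-- no zeros survive past the prefix
theorem count_drop_zero (pat : List Int) (h0 : (0 : Int) ∉ pat) (m n : Nat) :
    PySem.List.count ((List.flatten (List.replicate m pat)).drop n) (0 : Int) = 0 := by
  rw [PySem.List.count]
  have : (0 : Int) ∉ (List.flatten (List.replicate m pat)).drop n := by
    intro hmem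
    have := List.mem_of_mem_drop hmem
    rw [List.mem_flatten] at this
    obtain ⟨l, hl, h0l⟩ := this
    rw [List.eq_of_mem_replicate hl] at h0l
    exact h0 h0l
  simp [List.count_eq_zero.mpr this]

-- the final selection: A's running-max loop over three counters equals B's max-filter
set_option maxHeartbeats 2000000 in
set_option maxRecDepth 8192 in
theorem select_eq (a b c : Int) (ha : 0 ≤ a) (_hb : 0 ≤ b) (_hc : 0 ≤ c) :
    ((PySem.List.enumerate [a, b, c] 0).foldl
      (fun (s : Int × List Int) iv =>
        if iv.2 > s.1 then (iv.2, [iv.1 + 1])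
        else if iv.2 = s.1 then (s.1, s.2 ++ [iv.1 + 1])
        else s)
      (-1, [])).2
    = (PySem.List.enumerate [a, b, c] 0).filterMap
        (fun kv => if kv.2 = max a (max b c) then some (kv.1 + 1) else none) := by
  simp only [PySem.List.enumerate_cons, PySem.List.enumerate_nil, List.foldl_cons,
    List.foldl_nil, List.filterMap_cons, List.filterMap_nil]
  split_ifs <;> first | rfl | (exfalso; omega)


theorem foldA_shape0 (xs P : List Int) (h : xs.length ≤ P.length) :
    (PySem.List.enumerate xs 0).foldl
      (fun (a : List Int) (iv : Int × Int) =>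
        PySem.List.pySetD a iv.1 (PySem.List.pyGetD a iv.1 0 - iv.2)) P
    = List.zipWith (fun p v => p - v) P xs ++ P.drop xs.length := by
  have := foldA_shape xs [] P h
  simpa using this

theorem count_block (pat : List Int) (m : Nat) (answers : List Int)
    (hne : pat ≠ []) (h0 : (0 : Int) ∉ pat)
    (hlen : answers.length ≤ pat.length * m) :
    PySem.List.count
      (List.zipWith (fun p v => p - v) ((List.replicate m pat).flatten) answers
        ++ ((List.replicate m pat).flatten).drop answers.length) (0 : Int)
    = cnt pat 0 answers := by
  have happ : PySem.List.count
      (List.zipWith (fun p v => p - v) ((List.replicate m pat).flatten) answers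
        ++ ((List.replicate m pat).flatten).drop answers.length) (0 : Int)
      = PySem.List.count
          (List.zipWith (fun p v => p - v) ((List.replicate m pat).flatten) answers) (0 : Int)
        + PySem.List.count (((List.replicate m pat).flatten).drop answers.length) (0 : Int) := by
    simp [PySem.List.count_eq, List.count_append]
  rw [happ, count_drop_zero pat h0 m, add_zero]
  exact count_zip pat answers ((List.replicate m pat).flatten) 0
    (by rw [len_flat_rep]; exact hlen)
    (fun j hj => by
      have := cyc_getD pat hne m j (lt_of_lt_of_le hj hlen)
      simpa using this)

-- ===== VERDICT (by name: the statement is the Claim_ definition above) =====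
theorem solution_spec : Claim_equal_solution := by
  intro answers _ hpre
  unfold Pre_solution at hpre
  unfold Spec_solution solution solution_alt
  rw [show ([1, 2, 3, 4, 5] : List Int) = pat1 from rfl,
      show ([2, 1, 2, 3, 2, 4, 2, 5] : List Int) = pat2 from rfl,
      show ([3, 3, 1, 1, 2, 2, 4, 4, 5, 5] : List Int) = pat3 from rfl]
  dsimp only
  have hl1 : ((List.replicate 2000 pat1).flatten).length = 10000 := by
    rw [len_flat_rep]; rfl
  have hl2 : ((List.replicate 1250 pat2).flatten).length = 10000 := by
    rw [len_flat_rep]; rfl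
  have hl3 : ((List.replicate 1000 pat3).flatten).length = 10000 := by
    rw [len_flat_rep]; rfl
  rw [foldl_prod3,
      foldA_shape0 answers _ (by omega),
      foldA_shape0 answers _ (by omega),
      foldA_shape0 answers _ (by omega)]
  simp only
  rw [count_block pat1 2000 answers (by decide) (by decide) (by have h5 : pat1.length = 5 := rfl; rw [h5]; omega),
      count_block pat2 1250 answers (by decide) (by decide) (by have h8 : pat2.length = 8 := rfl; rw [h8]; omega),
      count_block pat3 1000 answers (by decide) (by decide) (by have h10 : pat3.length = 10 := rfl; rw [h10]; omega)]
  rw [goB_eq]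
  simp only [zero_add]
  exact select_eq _ _ _ (cnt_nonneg _ _ _) (cnt_nonneg _ _ _) (cnt_nonneg _ _ _)
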